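-- pv_equiv track=rewrite | github.com/grahamgill/foobar | src/bombsbaby.py | bombgenerations
-- ===== SOURCE A (Python) =====
-- def bombgenerations(m, f):
--   """
--   bombgenerations(m : int, f : int) : int
--
--   m: needed number of Mach bombs
--   f: needed number of Facula bombs
--   bombgenerations(m, f): smallest bomb replication generation (>= 0) at which m, f are achieved,
--     starting from 1 Mach and 1 Facula bomb, or -1 if it is impossible to achieve m, f.
--
--   In this approach we work backwards from a desired pair (m, f) to see if we can get to an initial set
--   of (M, F) bombs (1, 1).
--
--   The algorithm is in fact exactly the Euclidean algorithm for computing gcd(m, f), where the successive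
--   quotients count generations, and the final step is to reach a pair (gcd(m, f), 0). If m and f are
--   coprime then gcd(m, f) = 1 and from (1, 0) we can produce (1, 1) in one generation, so the generation
--   count we return is 1 less than the sum of successive quotients we've computed.
--
--   On the other hand, if gcd(m, f) > 1, then we have no way of reaching (1, 1) and there is no solution.
--   There is no way to reach (m, f) by starting with (1, 1) and successively producing either (M+F, F) or
--   (M, M+F) in the next generation from (M, F) in the current generation. Notice that gcd(M, F) =
--   gcd(M+F, F) = gcd(M, M+F), and so gcd(m, f) and gcd(1, 1) = 1 must be equal for the process to produce
--   (m, f) from (1, 1) eventually.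
--
--   We don't really need to import `gcd` from `fractions` since what we want is the Euclidean algorithm step
--   results, not just computation of the greatest common divisor.
--   """
--   assert m >= 0 and f >= 0, "Require nonnegative Mach and Facula targets, but got m == " + repr(m) + ", f == " + repr(f)
--   assert m <= 10**50 and f <= 10**50, "Require Mach and Facula targets both <= 10^50, but got m == " + repr(m) + ", f == " + repr(f)
--
--   generations = 0
--   while f > 0:
--     q, r = divmod(m, f)
--     generations += q
--     m, f = f, r
--   # now m = gcd of original m, f
--
--   return generations - 1 if m == 1 else -1
-- ===== SOURCE B (Python) =====
-- def bombgenerations(m, f):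
--   assert m >= 0 and f >= 0, "Require nonnegative Mach and Facula targets, but got m == " + repr(m) + ", f == " + repr(f)
--   assert m <= 10**50 and f <= 10**50, "Require Mach and Facula targets both <= 10^50, but got m == " + repr(m) + ", f == " + repr(f)
--
--   def euclid(a, b):
--     # returns (gcd(a, b), sum of successive Euclidean quotients)
--     if b == 0:
--       return a, 0
--     q, r = divmod(a, b)
--     g, s = euclid(b, r)
--     return g, s + q
--
--   g, s = euclid(m, f)
--   return s - 1 if g == 1 else -1
-- ===== Notes on version B (the rewrite author's own statement) =====
-- stated objective: alternative
-- what changed: Replaces the explicit while-loop with accumulator by a recursive Euclidean helper that returns the (gcd, quotient-sum) pair, combining results on the way out of the recursion.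
import Mathlib
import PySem

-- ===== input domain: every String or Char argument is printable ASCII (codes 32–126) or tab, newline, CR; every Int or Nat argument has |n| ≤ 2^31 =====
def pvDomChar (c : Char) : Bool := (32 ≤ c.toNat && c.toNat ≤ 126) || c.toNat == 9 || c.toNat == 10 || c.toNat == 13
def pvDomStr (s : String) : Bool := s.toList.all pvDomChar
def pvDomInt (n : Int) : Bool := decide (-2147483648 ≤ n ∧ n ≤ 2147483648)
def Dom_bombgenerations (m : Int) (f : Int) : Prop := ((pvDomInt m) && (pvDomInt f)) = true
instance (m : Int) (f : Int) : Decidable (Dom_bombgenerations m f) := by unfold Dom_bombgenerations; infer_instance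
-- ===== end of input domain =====

-- B replaces A's while-loop-with-accumulator by a recursive Euclidean helper returning the (gcd, quotient-sum) pair (alternative decomposition, same cost).


-- ===== PORT A =====
-- A's while loop: state (m, f, generations); each iteration q, r = divmod(m, f); generations += q; m, f = f, r.
def bombLoopA (m f generations : Int) : Int :=
  if h : 0 < f then
    bombLoopA f (PySem.Int.mod m f) (generations + PySem.Int.floordiv m f)
  else
    if m = 1 then generations - 1 else -1
termination_by f.natAbs
decreasing_by
  have := PySem.Int.mod_eq_emod_of_pos (a:=m) h
  have h1 : 0 ≤ m % f := Int.emod_nonneg m (by omega)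
  have h2 : m % f < f := Int.emod_lt_of_pos m h
  simp only [this]
  omega

def bombgenerations (m : Int) (f : Int) : Int := bombLoopA m f 0

-- ===== PORT B =====
-- B's recursive helper euclid(a, b): (gcd, quotient-sum).  Python's base case is b == 0;
-- the dichotomy here is b ≤ 0 only as a totality guard (b < 0 is never reached under Pre_).
def euclidB (a b : Int) : Int × Int :=
  if _h : b ≤ 0 then (a, 0)
  else
    let q := PySem.Int.floordiv a b
    let r := PySem.Int.mod a b
    let p := euclidB b r
    (p.1, p.2 + q)
termination_by b.natAbs
decreasing_by
  have hb : 0 < b := by omega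
  have := PySem.Int.mod_eq_emod_of_pos (a:=a) hb
  have h1 : 0 ≤ a % b := Int.emod_nonneg a (by omega)
  have h2 : a % b < b := Int.emod_lt_of_pos a hb
  simp only [this]
  omega

def bombgenerations_alt (m : Int) (f : Int) : Int :=
  let p := euclidB m f
  if p.1 = 1 then p.2 - 1 else -1

-- ===== PRECONDITION & SPEC =====
-- Pre_ excludes m < 0 or f < 0, on which both Pythons raise AssertionError (the upper-bound
-- assert m, f ≤ 10^50 never fires inside Dom, so it needs no clause).
def Pre_bombgenerations (m : Int) (f : Int) : Prop := 0 ≤ m ∧ 0 ≤ f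
instance (m : Int) (f : Int) : Decidable (Pre_bombgenerations m f) := by unfold Pre_bombgenerations; infer_instance
def pvWitness_bombgenerations : Int × Int := (4, 7)

def Spec_bombgenerations (m : Int) (f : Int) (out : Int) : Prop := out = bombgenerations_alt m f
instance (m : Int) (f : Int) (out : Int) : Decidable (Spec_bombgenerations m f out) := by unfold Spec_bombgenerations; infer_instance

-- ===== CLAIM (what is proved, stated in full; the proofs are below) =====
def Claim_equal_bombgenerations : Prop := ∀ (m : Int) (f : Int), Dom_bombgenerations m f → Pre_bombgenerations m f → Spec_bombgenerations m f (bombgenerations m f)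

-- ===== LEMMAS AND PROOFS =====
lemma bombLoopA_eq_euclidB : ∀ (n : Nat) (m f gen : Int), f.natAbs ≤ n → 0 ≤ f →
    bombLoopA m f gen =
      (if (euclidB m f).1 = 1 then gen + (euclidB m f).2 - 1 else -1) := by
  intro n
  induction n with
  | zero =>
    intro m f gen hle hf
    have hf0 : f = 0 := by omega
    subst hf0
    rw [bombLoopA, euclidB]
    simp
  | succ n ih =>
    intro m f gen hle hf
    rcases eq_or_lt_of_le hf with hf0 | hfpos
    · subst hf0
      rw [bombLoopA, euclidB]
      simp
    · rw [bombLoopA, euclidB]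
      simp only [hfpos, not_le.mpr hfpos, dif_pos, dif_neg, not_false_iff]
      have hmod := PySem.Int.mod_eq_emod_of_pos (a:=m) hfpos
      have h1 : 0 ≤ m % f := Int.emod_nonneg m (by omega)
      have h2 : m % f < f := Int.emod_lt_of_pos m hfpos
      have hrec := ih f (PySem.Int.mod m f) (gen + PySem.Int.floordiv m f)
        (by rw [hmod]; omega) (by rw [hmod]; exact h1)
      rw [hrec]
      split_ifs <;> ring

-- ===== VERDICT (by name: the statement is the Claim_ definition above) =====
theorem bombgenerations_spec : Claim_equal_bombgenerations := by
  intro m f _ hpre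
  show bombgenerations m f = bombgenerations_alt m f
  unfold bombgenerations bombgenerations_alt
  rw [bombLoopA_eq_euclidB f.natAbs m f 0 le_rfl hpre.2]
  simp only [zero_add]
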